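-- pv_equiv track=rewrite | github.com/rakesh-sengupta/cocolab_vwm | cocolab_vwm/core/pooling.py | pool_window_indices
-- ===== SOURCE A (Python) =====
-- def _check_pool(grid_shape: tuple[int, int], pool_size: int) -> None:
--     if pool_size < 1:
--         raise ValueError(f"pool_size must be >= 1, got {pool_size}")
--     rows, cols = grid_shape
--     if rows % pool_size != 0 or cols % pool_size != 0:
--         raise ValueError(
--             f"grid_shape {grid_shape} must be divisible by pool_size "
--             f"{pool_size}"
--         )
--
-- def pool_window_indices(
--     grid_shape: tuple[int, int], pool_size: int
-- ) -> list[list[int]]: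
--     """Return, for each upper-layer unit, the list of lower-layer indices
--     that fall in its pooling window.
--
--     Used to build the feedforward connection weight pattern: each upper
--     unit is connected to (and pools over) its block of ``pool_size**2``
--     lower units.
--
--     Returns
--     -------
--     windows : list of length n_pooled_nodes
--         windows[u] is the list of lower-layer node indices in upper unit u's
--         receptive field.
--     """
--     _check_pool(grid_shape, pool_size)
--     rows, cols = grid_shape
--     out_rows, out_cols = rows // pool_size, cols // pool_size
--     windows = []
--     for i in range(out_rows):
--         for j in range(out_cols):
--             block = []
--             for di in range(pool_size):
--                 for dj in range(pool_size):
--                     r = i * pool_size + di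
--                     c = j * pool_size + dj
--                     block.append(r * cols + c)
--             windows.append(block)
--     return windows
-- ===== SOURCE B (Python) =====
-- def _check_pool(grid_shape, pool_size):
--     if pool_size < 1:
--         raise ValueError(f"pool_size must be >= 1, got {pool_size}")
--     rows, cols = grid_shape
--     if rows % pool_size != 0 or cols % pool_size != 0:
--         raise ValueError(
--             f"grid_shape {grid_shape} must be divisible by pool_size "
--             f"{pool_size}"
--         )
--
-- def pool_window_indices(grid_shape, pool_size):
--     """Scatter decomposition: pre-allocate one bucket per upper unit, then
--     a single row-major pass over the lower layer assigns each lower index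
--     to its window."""
--     _check_pool(grid_shape, pool_size)
--     rows, cols = grid_shape
--     out_cols = cols // pool_size
--     windows = [[] for _ in range((rows // pool_size) * out_cols)]
--     for r in range(rows):
--         row_base = (r // pool_size) * out_cols
--         for c in range(cols):
--             windows[row_base + c // pool_size].append(r * cols + c)
--     return windows
-- ===== Notes on version B (the rewrite author's own statement) =====
-- stated objective: alternative
-- what changed: A gathers each window with four nested loops (per window i,j then per offset di,dj); B pre-allocates one bucket per upper unit and fills all buckets in a single row-major scatter pass, computing each lower index's window id by division; Pre_ excludes inputs where _check_pool raises ValueError, and grids with both dimensions negative (outside the natural domain of a grid shape, so neither value is specified: A's loops run zero times and give [], B sizes out_rows*out_cols > 0 buckets).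
-- outside the precondition, e.g. on pool_window_indices((-2, -2), 1): A returns [], B returns [[], [], [], []]
import Mathlib
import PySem

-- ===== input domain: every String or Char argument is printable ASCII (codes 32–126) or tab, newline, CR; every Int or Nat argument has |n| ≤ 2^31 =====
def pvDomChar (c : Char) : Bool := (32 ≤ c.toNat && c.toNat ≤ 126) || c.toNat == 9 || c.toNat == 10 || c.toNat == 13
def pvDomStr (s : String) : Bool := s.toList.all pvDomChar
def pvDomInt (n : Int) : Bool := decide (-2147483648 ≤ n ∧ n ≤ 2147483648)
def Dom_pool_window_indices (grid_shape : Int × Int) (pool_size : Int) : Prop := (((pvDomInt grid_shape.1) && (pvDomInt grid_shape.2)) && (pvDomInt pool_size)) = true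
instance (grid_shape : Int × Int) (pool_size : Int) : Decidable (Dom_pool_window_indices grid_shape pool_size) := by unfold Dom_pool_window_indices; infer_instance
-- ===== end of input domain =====

-- B replaces A's four nested per-window gather loops by a pre-allocated bucket list filled in one
-- row-major scatter pass over the lower layer (objective: alternative decomposition, same cost).

-- ===== PORT A =====
-- _check_pool raises ValueError outside Pre_pool_window_indices and computes nothing otherwise,
-- so it contributes no value to the port.
def pool_window_indices (grid_shape : Int × Int) (pool_size : Int) : List (List Int) :=
  let rows := grid_shape.1
  let cols := grid_shape.2
  let out_rows := PySem.Int.floordiv rows pool_size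
  let out_cols := PySem.Int.floordiv cols pool_size
  (PySem.List.pyRange 0 out_rows 1).foldl (fun windows i =>
    (PySem.List.pyRange 0 out_cols 1).foldl (fun windows j =>
      let block :=
        (PySem.List.pyRange 0 pool_size 1).foldl (fun block di =>
          (PySem.List.pyRange 0 pool_size 1).foldl (fun block dj =>
            let r := i * pool_size + di
            let c := j * pool_size + dj
            block ++ [r * cols + c]) block) []
      windows ++ [block]) windows) []

-- ===== PORT B =====
-- windows[wid].append(x) is ported as pySetD/pyGetD at index wid (in range on every admitted input).
def pool_window_indices_alt (grid_shape : Int × Int) (pool_size : Int) : List (List Int) :=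
  let rows := grid_shape.1
  let cols := grid_shape.2
  let out_cols := PySem.Int.floordiv cols pool_size
  let windows : List (List Int) :=
    List.replicate ((PySem.Int.floordiv rows pool_size) * out_cols).toNat []
  (PySem.List.pyRange 0 rows 1).foldl (fun windows r =>
    let row_base := (PySem.Int.floordiv r pool_size) * out_cols
    (PySem.List.pyRange 0 cols 1).foldl (fun windows c =>
      let wid := row_base + PySem.Int.floordiv c pool_size
      PySem.List.pySetD windows wid (PySem.List.pyGetD windows wid [] ++ [r * cols + c])) windows) windows

-- ===== PRECONDITION & SPEC =====
-- Pre_ excludes the inputs where _check_pool raises ValueError (pool_size < 1 or a dimension not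
-- divisible by pool_size), and grids with BOTH dimensions negative — outside the natural domain of
-- a grid shape, so neither return value is specified there: A's loops run zero times and give [],
-- while B sizes out_rows*out_cols > 0 buckets and gives that many empty lists.
def Pre_pool_window_indices (grid_shape : Int × Int) (pool_size : Int) : Prop :=
  1 ≤ pool_size ∧ PySem.Int.mod grid_shape.1 pool_size = 0 ∧
    PySem.Int.mod grid_shape.2 pool_size = 0 ∧ (0 ≤ grid_shape.1 ∨ 0 ≤ grid_shape.2)
instance (grid_shape : Int × Int) (pool_size : Int) : Decidable (Pre_pool_window_indices grid_shape pool_size) := by unfold Pre_pool_window_indices; infer_instance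

def pvWitness_pool_window_indices : (Int × Int) × Int := ((4, 6), 2)

def Spec_pool_window_indices (grid_shape : Int × Int) (pool_size : Int) (out : List (List Int)) : Prop := out = pool_window_indices_alt grid_shape pool_size
instance (grid_shape : Int × Int) (pool_size : Int) (out : List (List Int)) : Decidable (Spec_pool_window_indices grid_shape pool_size out) := by unfold Spec_pool_window_indices; infer_instance

-- ===== CLAIM (what is proved, stated in full; the proofs are below) =====
def Claim_equal_pool_window_indices : Prop := ∀ (grid_shape : Int × Int) (pool_size : Int), Dom_pool_window_indices grid_shape pool_size → Pre_pool_window_indices grid_shape pool_size → Spec_pool_window_indices grid_shape pool_size (pool_window_indices grid_shape pool_size)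

-- ===== LEMMAS AND PROOFS =====

-- Canonical Nat-level description shared by both proofs: with rows = R*P, cols = C*P,
-- window (i,j) holds the values r*(C*P)+c for r = i*P+di, c = j*P+dj, dj innermost.
def pvRow (P CP r j : Nat) : List Int :=
  (List.range P).map (fun dj => ((r * CP + (j * P + dj) : Nat) : Int))

def pvBlk (P CP i j : Nat) : List Int :=
  (List.range P).flatMap (fun di => pvRow P CP (i * P + di) j)

def pvGather (R C P CP : Nat) : List (List Int) :=
  (List.range R).flatMap (fun i => (List.range C).map (fun j => pvBlk P CP i j))

-- scatter machinery (Nat-level model of port B's loop body)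
def pvUpd (ws : List (List Int)) (kv : Nat × List Int) : List (List Int) :=
  ws.set kv.1 (ws.getD kv.1 [] ++ kv.2)

def pvScat (ws : List (List Int)) (L : List (Nat × List Int)) : List (List Int) :=
  L.foldl pvUpd ws

def pvPairs (R C P CP : Nat) : List (Nat × List Int) :=
  (List.range R).flatMap (fun i =>
    (List.range P).flatMap (fun di =>
      (List.range C).map (fun j => (i * C + j, pvRow P CP (i * P + di) j))))

lemma pv_range_mul (C P : Nat) :
    List.range (C * P) = (List.range C).flatMap (fun j => (List.range P).map (fun dj => j * P + dj)) := by
  induction C with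
  | zero => simp
  | succ C ih =>
    have : (C + 1) * P = C * P + P := by ring
    rw [this, List.range_add, List.range_succ, List.flatMap_append, ← ih]
    simp

lemma pv_foldl_flatMap {α β γ : Type} (l : List α) (g : α → List β) (f : γ → β → γ) (init : γ) :
    (l.flatMap g).foldl f init = l.foldl (fun a x => (g x).foldl f a) init := by
  induction l generalizing init with
  | nil => rfl
  | cons x l ih => simp [List.foldl_append, ih]

lemma pv_length_pvScat (ws : List (List Int)) (L : List (Nat × List Int)) :
    (pvScat ws L).length = ws.length := by
  induction L generalizing ws with
  | nil => rfl
  | cons kv L ih => simp [pvScat, List.foldl_cons] at ih ⊢; rw [ih]; simp [pvUpd]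

lemma pv_getElem?_pvScat (L : List (Nat × List Int)) (ws : List (List Int)) (u : Nat)
    (hu : u < ws.length) :
    (pvScat ws L)[u]? = some (ws.getD u [] ++ (L.filter (fun kv => kv.1 == u)).flatMap (·.2)) := by
  induction L generalizing ws with
  | nil =>
    simp [pvScat, List.getElem?_eq_getElem hu]
  | cons kv L ih =>
    have hlen : (pvUpd ws kv).length = ws.length := by simp [pvUpd]
    have h2 : (pvScat (pvUpd ws kv) L)[u]? =
        some ((pvUpd ws kv).getD u [] ++ (L.filter (fun kv => kv.1 == u)).flatMap (·.2)) :=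
      ih (pvUpd ws kv) (by omega)
    have hgoal : (pvScat ws (kv :: L))[u]? = (pvScat (pvUpd ws kv) L)[u]? := rfl
    rw [hgoal, h2]
    by_cases hk : kv.1 = u
    · subst hk
      have hset : (pvUpd ws kv).getD kv.1 [] = ws.getD kv.1 [] ++ kv.2 := by
        simp [pvUpd, List.getD_eq_getElem?_getD, List.getElem?_set_self hu]
      rw [hset, List.filter_cons]
      simp [List.append_assoc]
    · have hset : (pvUpd ws kv).getD u [] = ws.getD u [] := by
        simp [pvUpd, List.getD_eq_getElem?_getD, List.getElem?_set_ne hk]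
      rw [hset, List.filter_cons]
      simp [hk]

lemma pv_scat_run (k : Nat) (l : List Int) (ws : List (List Int)) :
    l.foldl (fun ws v => pvUpd ws (k, [v])) ws = pvUpd ws (k, l) := by
  induction l generalizing ws with
  | nil =>
    by_cases hk : k < ws.length
    · simp [pvUpd, List.getD_eq_getElem?_getD, List.getElem?_eq_getElem hk,
        List.set_getElem_self hk]
    · simp [pvUpd, List.set_eq_of_length_le (by omega : ws.length ≤ k)]
  | cons v l ih =>
    rw [List.foldl_cons, ih _]
    by_cases hk : k < ws.length
    · simp [pvUpd, List.getD_eq_getElem?_getD, List.getElem?_set_self hk, List.append_assoc]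
    · simp [pvUpd, List.set_eq_of_length_le (by omega : ws.length ≤ k)]

lemma pv_length_pvGather (R C P CP : Nat) : (pvGather R C P CP).length = R * C := by
  induction R with
  | zero => simp [pvGather]
  | succ R ih =>
    have hsplit : pvGather (R + 1) C P CP =
        pvGather R C P CP ++ (List.range C).map (fun j => pvBlk P CP R j) := by
      unfold pvGather
      rw [List.range_succ, List.flatMap_append]
      simp
    rw [hsplit, List.length_append, ih, List.length_map, List.length_range]
    ring

lemma pv_flatMap_sing {α β : Type} (l : List α) (f : α → β) :
    l.flatMap (fun x => [f x]) = l.map f := by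
  induction l with
  | nil => rfl
  | cons x l ih => simp [ih]

lemma pv_getElem?_pvGather (R C P CP u : Nat) (hu : u < R * C) :
    (pvGather R C P CP)[u]? = some (pvBlk P CP (u / C) (u % C)) := by
  induction R with
  | zero => omega
  | succ R ih =>
    have h1 : (R + 1) * C = R * C + C := by ring
    have hsplit : pvGather (R + 1) C P CP =
        pvGather R C P CP ++ (List.range C).map (fun j => pvBlk P CP R j) := by
      unfold pvGather
      rw [List.range_succ, List.flatMap_append]
      simp
    rw [hsplit]
    by_cases hlt : u < R * C
    · rw [List.getElem?_append_left (by rw [pv_length_pvGather]; exact hlt), ih hlt]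
    · have hu' : u < R * C + C := by omega
      rw [List.getElem?_append_right (by rw [pv_length_pvGather]; omega)]
      rw [pv_length_pvGather, List.getElem?_map, List.getElem?_range (by omega : u - R * C < C)]
      have hdiv : u / C = R := Nat.div_eq_of_lt_le (by omega) (by omega)
      have hmod : u % C = u - R * C := by
        have hcomm : C * R = R * C := Nat.mul_comm C R
        have h2 : u = (u - R * C) + C * R := by omega
        calc u % C = ((u - R * C) + C * R) % C := by rw [← h2]
          _ = (u - R * C) % C := Nat.add_mul_mod_self_left _ _ _
          _ = u - R * C := Nat.mod_eq_of_lt (by omega)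
      rw [hdiv, hmod]
      rfl

lemma pv_key_inj {C i j i0 j0 : Nat} (hj : j < C) (hj0 : j0 < C) :
    i * C + j = i0 * C + j0 ↔ i = i0 ∧ j = j0 := by
  constructor
  · intro h
    have hC : 0 < C := by omega
    have e1 : (i * C + j) / C = i := by
      rw [mul_comm, Nat.mul_add_div hC, Nat.div_eq_of_lt hj]; omega
    have e2 : (i0 * C + j0) / C = i0 := by
      rw [mul_comm, Nat.mul_add_div hC, Nat.div_eq_of_lt hj0]; omega
    have e3 : (i * C + j) % C = j := by
      rw [mul_comm, Nat.mul_add_mod, Nat.mod_eq_of_lt hj]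
    have e4 : (i0 * C + j0) % C = j0 := by
      rw [mul_comm, Nat.mul_add_mod, Nat.mod_eq_of_lt hj0]
    constructor
    · rw [← e1, ← e2, h]
    · rw [← e3, ← e4, h]
  · rintro ⟨rfl, rfl⟩; rfl

lemma pv_filter_range_eq (C j0 : Nat) (h : j0 < C) :
    (List.range C).filter (fun j => j == j0) = [j0] := by
  induction C with
  | zero => omega
  | succ C ih =>
    rw [List.range_succ, List.filter_append]
    by_cases hc : j0 < C
    · rw [ih hc]
      have : C ≠ j0 := by omega
      simp [this]
    · have : j0 = C := by omega
      subst this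
      have : (List.range j0).filter (fun j => j == j0) = [] := by
        rw [List.filter_eq_nil_iff]
        intro a ha
        simp at ha ⊢
        omega
      simp [this]

lemma pv_filter_flatMap {α β : Type} (l : List α) (g : α → List β) (p : β → Bool) :
    (l.flatMap g).filter p = l.flatMap (fun x => (g x).filter p) := by
  induction l with
  | nil => rfl
  | cons x l ih => simp [List.filter_append, ih]

lemma pv_flatMap_single {β : Type} (R i0 : Nat) (X : List β) (h : i0 < R) :
    (List.range R).flatMap (fun i => if i = i0 then X else []) = X := by
  induction R with
  | zero => omega
  | succ R ih =>
    rw [List.range_succ, List.flatMap_append]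
    by_cases hc : i0 < R
    · rw [ih hc]
      have : R ≠ i0 := by omega
      simp [this]
    · have he : i0 = R := by omega
      subst he
      have : (List.range i0).flatMap (fun i => if i = i0 then X else []) = [] := by
        apply List.flatMap_eq_nil_iff.mpr
        intro a ha
        simp at ha
        simp [Nat.ne_of_lt ha]
      simp [this]

lemma pv_filter_pvPairs (R C P CP i0 j0 : Nat) (hi0 : i0 < R) (hj0 : j0 < C) :
    (pvPairs R C P CP).filter (fun kv => kv.1 == i0 * C + j0) =
      (List.range P).map (fun di => (i0 * C + j0, pvRow P CP (i0 * P + di) j0)) := by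
  unfold pvPairs
  rw [pv_filter_flatMap]
  have hstep : ∀ i ∈ List.range R,
      ((List.range P).flatMap (fun di =>
          (List.range C).map fun j => (i * C + j, pvRow P CP (i * P + di) j))).filter
        (fun kv => kv.1 == i0 * C + j0) =
      (if i = i0 then (List.range P).map (fun di => (i0 * C + j0, pvRow P CP (i0 * P + di) j0))
       else []) := by
    intro i _
    rw [pv_filter_flatMap]
    by_cases hii : i = i0
    · subst hii
      rw [if_pos rfl]
      have hinner : ∀ di ∈ List.range P,
          ((List.range C).map fun j => (i * C + j, pvRow P CP (i * P + di) j)).filter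
            (fun kv => kv.1 == i * C + j0) =
          [(i * C + j0, pvRow P CP (i * P + di) j0)] := by
        intro di _
        rw [List.filter_map]
        have hcong : (List.range C).filter
            ((fun kv => kv.1 == i * C + j0) ∘ fun j => (i * C + j, pvRow P CP (i * P + di) j)) =
            (List.range C).filter (fun j => j == j0) := by
          apply List.filter_congr
          intro j hj
          simp only [Function.comp]
          simp only [List.mem_range] at hj
          by_cases hjj : j = j0
          · simp [hjj]
          · simp [hjj]
        rw [hcong, pv_filter_range_eq C j0 hj0]
        rfl
      rw [List.flatMap_congr hinner]
      exact pv_flatMap_sing _ _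
    · rw [if_neg hii]
      apply List.flatMap_eq_nil_iff.mpr
      intro di _
      rw [List.filter_map]
      have : (List.range C).filter
          ((fun kv => kv.1 == i0 * C + j0) ∘ fun j => (i * C + j, pvRow P CP (i * P + di) j)) = [] := by
        rw [List.filter_eq_nil_iff]
        intro j hj
        simp only [List.mem_range] at hj
        simp only [Function.comp, beq_iff_eq]
        intro hcontra
        exact hii ((pv_key_inj hj hj0).mp hcontra).1
      rw [this]
      rfl
  rw [List.flatMap_congr hstep]
  exact pv_flatMap_single R i0 _ hi0

-- A's nested loops produce exactly pvGather.
lemma pv_A_eq (R C P : Nat) (hP : 0 < P) :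
    pool_window_indices (((R * P : Nat) : Int), ((C * P : Nat) : Int)) ((P : Nat) : Int) =
      pvGather R C P (C * P) := by
  have hRP : PySem.Int.floordiv ((R * P : Nat) : Int) ((P : Nat) : Int) = ((R : Nat) : Int) := by
    rw [PySem.Int.floordiv_natCast, Nat.mul_div_cancel _ hP]
  have hCP : PySem.Int.floordiv ((C * P : Nat) : Int) ((P : Nat) : Int) = ((C : Nat) : Int) := by
    rw [PySem.Int.floordiv_natCast, Nat.mul_div_cancel _ hP]
  simp only [pool_window_indices, hRP, hCP, PySem.List.pyRange_one, Int.sub_zero,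
    Int.toNat_natCast, zero_add, List.foldl_map,
    PySem.List.foldl_append_singleton_eq_map, PySem.List.foldl_append_eq_flatMap,
    List.nil_append]
  unfold pvGather
  apply List.flatMap_congr
  intro i _
  apply List.map_congr_left
  intro j _
  unfold pvBlk
  apply List.flatMap_congr
  intro di _
  unfold pvRow
  apply List.map_congr_left
  intro dj _
  push_cast
  ring

-- B's scatter pass equals pvScat over pvPairs …
lemma pv_B_eq_scat (R C P : Nat) (hP : 0 < P) :
    pool_window_indices_alt (((R * P : Nat) : Int), ((C * P : Nat) : Int)) ((P : Nat) : Int) =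
      pvScat (List.replicate (R * C) []) (pvPairs R C P (C * P)) := by
  have hRP : PySem.Int.floordiv ((R * P : Nat) : Int) ((P : Nat) : Int) = ((R : Nat) : Int) := by
    rw [PySem.Int.floordiv_natCast, Nat.mul_div_cancel _ hP]
  have hCP : PySem.Int.floordiv ((C * P : Nat) : Int) ((P : Nat) : Int) = ((C : Nat) : Int) := by
    rw [PySem.Int.floordiv_natCast, Nat.mul_div_cancel _ hP]
  have hrep : (((R : Nat) : Int) * ((C : Nat) : Int)).toNat = R * C := by
    have : ((R : Nat) : Int) * ((C : Nat) : Int) = ((R * C : Nat) : Int) := by push_cast; ring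
    rw [this, Int.toNat_natCast]
  simp only [pool_window_indices_alt, hRP, hCP, hrep, PySem.List.pyRange_one, Int.sub_zero,
    Int.toNat_natCast, zero_add, List.foldl_map]
  -- turn each Python-level step into the Nat-level pvUpd step
  have hsteps : ∀ (ws : List (List Int)), ∀ r ∈ List.range (R * P),
      (List.range (C * P)).foldl (fun ws (c : Nat) =>
        PySem.List.pySetD ws
          (PySem.Int.floordiv ((r : Nat) : Int) ((P : Nat) : Int) * ((C : Nat) : Int) +
            PySem.Int.floordiv ((c : Nat) : Int) ((P : Nat) : Int))
          (PySem.List.pyGetD ws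
            (PySem.Int.floordiv ((r : Nat) : Int) ((P : Nat) : Int) * ((C : Nat) : Int) +
              PySem.Int.floordiv ((c : Nat) : Int) ((P : Nat) : Int)) [] ++
            [((r : Nat) : Int) * ((C * P : Nat) : Int) + ((c : Nat) : Int)])) ws =
      pvScat ws ((List.range C).map (fun j => (r / P * C + j, pvRow P (C * P) r j))) := by
    intro ws r _
    have hcong : ∀ (ws : List (List Int)), ∀ c ∈ List.range (C * P),
        PySem.List.pySetD ws
          (PySem.Int.floordiv ((r : Nat) : Int) ((P : Nat) : Int) * ((C : Nat) : Int) +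
            PySem.Int.floordiv ((c : Nat) : Int) ((P : Nat) : Int))
          (PySem.List.pyGetD ws
            (PySem.Int.floordiv ((r : Nat) : Int) ((P : Nat) : Int) * ((C : Nat) : Int) +
              PySem.Int.floordiv ((c : Nat) : Int) ((P : Nat) : Int)) [] ++
            [((r : Nat) : Int) * ((C * P : Nat) : Int) + ((c : Nat) : Int)]) =
        pvUpd ws (r / P * C + c / P, [((r * (C * P) + c : Nat) : Int)]) := by
      intro ws c _
      have hk : (PySem.Int.floordiv ((r : Nat) : Int) ((P : Nat) : Int) * ((C : Nat) : Int) +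
          PySem.Int.floordiv ((c : Nat) : Int) ((P : Nat) : Int)) =
          ((r / P * C + c / P : Nat) : Int) := by
        rw [PySem.Int.floordiv_natCast, PySem.Int.floordiv_natCast]
        push_cast
        ring
      have hv : (((r : Nat) : Int) * ((C * P : Nat) : Int) + ((c : Nat) : Int)) =
          ((r * (C * P) + c : Nat) : Int) := by push_cast; ring
      rw [hk, hv, PySem.List.pySetD_natCast, PySem.List.pyGetD_natCast]
      rfl
    rw [PySem.List.foldl_congr_mem _ _ _ ws hcong]
    -- regroup range (C*P) into C runs of P and collapse each run
    rw [pv_range_mul C P, pv_foldl_flatMap, pvScat, List.foldl_map]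
    apply PySem.List.foldl_congr_mem
    intro ws' j hj
    simp only [List.mem_range] at hj
    have hdj : ∀ (ws : List (List Int)), ∀ dj ∈ List.range P,
        pvUpd ws (r / P * C + (j * P + dj) / P, [((r * (C * P) + (j * P + dj) : Nat) : Int)]) =
        pvUpd ws (r / P * C + j, [((r * (C * P) + (j * P + dj) : Nat) : Int)]) := by
      intro ws dj hdj
      simp only [List.mem_range] at hdj
      have : (j * P + dj) / P = j := by
        rw [mul_comm, Nat.mul_add_div hP, Nat.div_eq_of_lt hdj]
        omega
      rw [this]
    rw [List.foldl_map, PySem.List.foldl_congr_mem _ _ _ ws' hdj, ← List.foldl_map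
      (f := fun dj => ((r * (C * P) + (j * P + dj) : Nat) : Int))
      (g := fun ws v => pvUpd ws (r / P * C + j, [v])), pv_scat_run]
    rfl
  rw [PySem.List.foldl_congr_mem _ _ _ _ hsteps]
  -- flatten the outer fold and reindex rows as (band, offset)
  unfold pvScat
  rw [← pv_foldl_flatMap (List.range (R * P))
      (fun r => (List.range C).map fun j => (r / P * C + j, pvRow P (C * P) r j))
      pvUpd (List.replicate (R * C) [])]
  have : (List.range (R * P)).flatMap
      (fun r => (List.range C).map fun j => (r / P * C + j, pvRow P (C * P) r j)) =
      pvPairs R C P (C * P) := by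
    rw [pv_range_mul R P]
    unfold pvPairs
    rw [List.flatMap_assoc]
    apply List.flatMap_congr
    intro i _
    rw [List.flatMap_map]
    apply List.flatMap_congr
    intro di hdi
    simp only [List.mem_range] at hdi
    have hdiv : (i * P + di) / P = i := by
      rw [mul_comm, Nat.mul_add_div hP, Nat.div_eq_of_lt hdi]
      omega
    rw [hdiv]
  rw [this]

-- B's scatter pass produces exactly pvGather.
lemma pv_B_eq (R C P : Nat) (hP : 0 < P) :
    pool_window_indices_alt (((R * P : Nat) : Int), ((C * P : Nat) : Int)) ((P : Nat) : Int) =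
      pvGather R C P (C * P) := by
  rw [pv_B_eq_scat R C P hP]
  apply List.ext_getElem?
  intro u
  by_cases hu : u < R * C
  · rw [pv_getElem?_pvScat _ _ _ (by simp [List.length_replicate]; exact hu)]
    rw [pv_getElem?_pvGather R C P (C * P) u hu]
    have hC : 0 < C := by
      by_contra h
      have hc0 : C = 0 := by omega
      rw [hc0, Nat.mul_zero] at hu
      omega
    have hki : u = (u / C) * C + u % C := by
      rw [mul_comm]
      exact (Nat.div_add_mod u C).symm
    have hfil := pv_filter_pvPairs R C P (C * P) (u / C) (u % C)
      (by rw [Nat.div_lt_iff_lt_mul hC]; omega) (Nat.mod_lt _ hC)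
    rw [show (fun kv : Nat × List Int => kv.1 == u) =
        (fun kv : Nat × List Int => kv.1 == u / C * C + u % C) by rw [← hki]]
    rw [hfil]
    have : ((List.range P).map
        (fun di => (u / C * C + u % C, pvRow P (C * P) (u / C * P + di) (u % C)))).flatMap
          (fun kv => kv.2) =
        pvBlk P (C * P) (u / C) (u % C) := by
      rw [List.flatMap_map]
      rfl
    rw [this]
    simp [List.getD_eq_getElem?_getD, hu]
  · rw [List.getElem?_eq_none, List.getElem?_eq_none]
    · rw [pv_length_pvGather]; omega
    · rw [pv_length_pvScat]; simp [List.length_replicate]; omega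

-- Degenerate grids admitted by Pre_ with one negative dimension: both programs return [].
lemma pv_A_empty (rows cols p : Int) (hp : 1 ≤ p)
    (h : rows < 0 ∨ (0 ≤ rows ∧ cols < 0)) :
    pool_window_indices (rows, cols) p = [] := by
  rcases h with h | ⟨h0, h1⟩
  · have hor : PySem.Int.floordiv rows p < 0 :=
      (PySem.Int.floordiv_lt_iff_lt_mul (by omega)).mpr (by omega)
    simp [pool_window_indices, PySem.List.pyRange_one_eq_nil
      (show PySem.Int.floordiv rows p ≤ 0 by omega)]
  · have hoc : PySem.Int.floordiv cols p < 0 :=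
      (PySem.Int.floordiv_lt_iff_lt_mul (by omega)).mpr (by omega)
    simp [pool_window_indices, PySem.List.pyRange_one_eq_nil
      (show PySem.Int.floordiv cols p ≤ 0 by omega)]

lemma pv_B_empty (rows cols p : Int) (hp : 1 ≤ p)
    (h : (rows < 0 ∧ 0 ≤ cols) ∨ (0 ≤ rows ∧ cols < 0)) :
    pool_window_indices_alt (rows, cols) p = [] := by
  rcases h with ⟨h0, h1⟩ | ⟨h0, h1⟩
  · have hor : PySem.Int.floordiv rows p < 0 :=
      (PySem.Int.floordiv_lt_iff_lt_mul (by omega)).mpr (by omega)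
    have hoc : 0 ≤ PySem.Int.floordiv cols p :=
      (PySem.Int.le_floordiv_iff_mul_le (by omega)).mpr (by omega)
    have hprod : PySem.Int.floordiv rows p * PySem.Int.floordiv cols p ≤ 0 :=
      mul_nonpos_of_nonpos_of_nonneg (by omega) hoc
    simp [pool_window_indices_alt, PySem.List.pyRange_one_eq_nil
      (show rows ≤ 0 by omega), Int.toNat_of_nonpos hprod]
  · have hor : 0 ≤ PySem.Int.floordiv rows p :=
      (PySem.Int.le_floordiv_iff_mul_le (by omega)).mpr (by omega)
    have hoc : PySem.Int.floordiv cols p < 0 :=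
      (PySem.Int.floordiv_lt_iff_lt_mul (by omega)).mpr (by omega)
    have hprod : PySem.Int.floordiv rows p * PySem.Int.floordiv cols p ≤ 0 :=
      mul_nonpos_of_nonneg_of_nonpos hor (by omega)
    simp [pool_window_indices_alt, PySem.List.pyRange_one_eq_nil
      (show cols ≤ 0 by omega), Int.toNat_of_nonpos hprod]

-- ===== VERDICT (by name: the statement is the Claim_ definition above) =====
theorem pool_window_indices_spec : Claim_equal_pool_window_indices := by
  intro gs p _ hpre
  obtain ⟨rows, cols⟩ := gs
  obtain ⟨hp, hmr, hmc, hnn⟩ := hpre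
  unfold Spec_pool_window_indices
  by_cases hr : 0 ≤ rows
  · by_cases hc : 0 ≤ cols
    · lift p to Nat using (by omega) with P
      lift rows to Nat using hr with rs
      lift cols to Nat using hc with cs
      rw [PySem.Int.mod_natCast] at hmr hmc
      have hP : 0 < P := by exact_mod_cast hp
      have hdr : P ∣ rs := by
        have : rs % P = 0 := by exact_mod_cast hmr
        omega
      have hdc : P ∣ cs := by
        have : cs % P = 0 := by exact_mod_cast hmc
        omega
      obtain ⟨R, rfl⟩ := hdr
      obtain ⟨C, rfl⟩ := hdc
      rw [mul_comm P R, mul_comm P C]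
      rw [pv_A_eq R C P hP, pv_B_eq R C P hP]
    · rw [pv_A_empty rows cols p hp (Or.inr ⟨hr, by omega⟩),
        pv_B_empty rows cols p hp (Or.inr ⟨hr, by omega⟩)]
  · have hc : 0 ≤ cols := by
      rcases hnn with h | h
      · omega
      · exact h
    rw [pv_A_empty rows cols p hp (Or.inl (by omega)),
      pv_B_empty rows cols p hp (Or.inl ⟨by omega, hc⟩)]
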